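-- pv_equiv track=rewrite | github.com/aalteirac/partner_sizing_single | info.py | warehousecustom
-- ===== SOURCE A (Python) =====
-- def warehousecustom(param,arrLimit,arrResult):
--     res=0
--     for idx,lm in enumerate(arrLimit):
--         if param<=lm:
--             res=arrResult[idx]
--             break
--         if idx+1<=len(arrLimit)-1:
--             if param>=lm and param<=arrLimit[idx+1]:
--                 res=arrResult[idx]
--                 break
--         else:
--            res=arrResult[idx]
--            break
--     return res
-- ===== SOURCE B (Python) =====
-- def warehousecustom(param, arrLimit, arrResult):
--     # Divide-and-conquer first-match: recursively split the index range in two,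
--     # search the left half, and fall through to the right half only when the
--     # left half holds no limit >= param; correct with no sortedness assumption.
--     def first_ge(lo, hi):
--         if hi <= lo:
--             return hi
--         if hi - lo == 1:
--             return lo if param <= arrLimit[lo] else hi
--         mid = (lo + hi) // 2
--         k = first_ge(lo, mid)
--         return k if k < mid else first_ge(mid, hi)
--     if not arrLimit:
--         return 0
--     k = first_ge(0, len(arrLimit))
--     return arrResult[max(k - 1, 0)]
-- ===== Notes on version B (the rewrite author's own statement) =====
-- stated objective: alternative
-- what changed: A's forward loop with a lookahead on arrLimit[idx+1] and three break sites is replaced by a recursive divide-and-conquer first-match (split the index range, take the left half's match if any, else search the right half) followed by one clamped lookup arrResult[max(k-1,0)].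
import Mathlib
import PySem

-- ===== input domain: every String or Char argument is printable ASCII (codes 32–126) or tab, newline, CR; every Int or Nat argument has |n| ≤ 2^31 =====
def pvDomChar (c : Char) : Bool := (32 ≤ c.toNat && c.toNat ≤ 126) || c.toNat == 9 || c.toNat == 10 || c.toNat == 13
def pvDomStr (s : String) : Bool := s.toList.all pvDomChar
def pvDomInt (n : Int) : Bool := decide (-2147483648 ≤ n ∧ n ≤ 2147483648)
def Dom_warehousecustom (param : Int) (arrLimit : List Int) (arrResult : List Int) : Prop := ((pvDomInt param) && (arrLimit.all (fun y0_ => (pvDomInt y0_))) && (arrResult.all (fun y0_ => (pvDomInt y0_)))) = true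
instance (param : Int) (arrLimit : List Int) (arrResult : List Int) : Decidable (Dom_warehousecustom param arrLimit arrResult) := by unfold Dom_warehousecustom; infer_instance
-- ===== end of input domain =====

-- B replaces A's three-break lookahead loop by a recursive divide-and-conquer
-- first-match over the index range plus one clamped lookup (same O(n) cost,
-- a different algorithm structure; no sortedness assumed).

-- ===== PORT A =====
-- the 'for idx,lm in enumerate(arrLimit): … break' loop of A, step for step;
-- arrResult[idx] / arrLimit[idx+1] are ported with pyGet? (getD 0 only fires
-- outside Pre_, where the Python raises IndexError)
def wcLoopA (param : Int) (arrLimit arrResult : List Int) (idx : Nat) (res : Int) : Int :=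
  if h : idx < arrLimit.length then
    let lm := arrLimit[idx]
    if param ≤ lm then
      (PySem.List.pyGet? arrResult (idx : Int)).getD 0
    else if idx + 1 ≤ arrLimit.length - 1 then
      if param ≥ lm ∧ param ≤ (PySem.List.pyGet? arrLimit ((idx : Int) + 1)).getD 0 then
        (PySem.List.pyGet? arrResult (idx : Int)).getD 0
      else
        wcLoopA param arrLimit arrResult (idx + 1) res
    else
      (PySem.List.pyGet? arrResult (idx : Int)).getD 0
  else res
termination_by arrLimit.length - idx

def warehousecustom (param : Int) (arrLimit : List Int) (arrResult : List Int) : Int :=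
  wcLoopA param arrLimit arrResult 0 0

-- ===== PORT B =====
-- Source B's first_ge(lo,hi): binary splitting of the index range; arrLimit[lo] is
-- ported with pyGet? (the getD 0 default never fires when hi ≤ length)
-- fuel = a bound on hi - lo, only to make the recursion structural; it never
-- runs out at the call site below
def wcFirstGe (param : Int) (arrLimit : List Int) : Nat → Nat → Nat → Nat
  | 0, _, hi => hi
  | fuel + 1, lo, hi =>
    if hi ≤ lo then hi
    else if hi - lo = 1 then
      if param ≤ (PySem.List.pyGet? arrLimit (lo : Int)).getD 0 then lo else hi
    else
      let mid := (lo + hi) / 2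
      let k := wcFirstGe param arrLimit fuel lo mid
      if k < mid then k else wcFirstGe param arrLimit fuel mid hi

def warehousecustom_alt (param : Int) (arrLimit : List Int) (arrResult : List Int) : Int :=
  if arrLimit = [] then 0
  else
    let k := wcFirstGe param arrLimit arrLimit.length 0 arrLimit.length
    (PySem.List.pyGet? arrResult ((k - 1 : Nat) : Int)).getD 0

-- ===== PRECONDITION & SPEC =====
-- Pre_ excludes exactly the inputs where A raises IndexError (arrResult too
-- short at the one index both programs read: max(k-1,0) for k the first index
-- with param ≤ arrLimit[k], or len(arrLimit) when there is none).
def Pre_warehousecustom (param : Int) (arrLimit : List Int) (arrResult : List Int) : Prop :=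
  arrLimit = [] ∨ (arrLimit.findIdx (fun lm => decide (param ≤ lm)) - 1) < arrResult.length

instance (param : Int) (arrLimit : List Int) (arrResult : List Int) : Decidable (Pre_warehousecustom param arrLimit arrResult) := by unfold Pre_warehousecustom; infer_instance

def pvWitness_warehousecustom : Int × List Int × List Int := (2, [1, 5, 9], [10, 20, 30])

def Spec_warehousecustom (param : Int) (arrLimit : List Int) (arrResult : List Int) (out : Int) : Prop := out = warehousecustom_alt param arrLimit arrResult
instance (param : Int) (arrLimit : List Int) (arrResult : List Int) (out : Int) : Decidable (Spec_warehousecustom param arrLimit arrResult out) := by unfold Spec_warehousecustom; infer_instance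

-- ===== CLAIM (what is proved, stated in full; the proofs are below) =====
def Claim_equal_warehousecustom : Prop := ∀ (param : Int) (arrLimit : List Int) (arrResult : List Int), Dom_warehousecustom param arrLimit arrResult → Pre_warehousecustom param arrLimit arrResult → Spec_warehousecustom param arrLimit arrResult (warehousecustom param arrLimit arrResult)

-- ===== LEMMAS AND PROOFS =====

-- A-side loop invariant: entering iteration idx, every earlier limit (and,
-- unless idx = 0, the current one too) is strictly below param; then the loop
-- returns arrResult[max(k-1,0)] for k = findIdx.
lemma wcLoopA_eq (param : Int) (arrLimit arrResult : List Int) (res : Int) (idx : Nat)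
    (hlt : idx < arrLimit.length)
    (hprev : ∀ j (hj : j < idx), arrLimit[j]'(by omega) < param)
    (hidx : idx = 0 ∨ arrLimit[idx] < param) :
    wcLoopA param arrLimit arrResult idx res
      = (PySem.List.pyGet? arrResult
          (((arrLimit.findIdx (fun lm => decide (param ≤ lm)) - 1 : Nat) : Int))).getD 0 := by
  generalize hn : arrLimit.length - idx = n
  induction n generalizing idx with
  | zero => omega
  | succ n ih =>
    unfold wcLoopA
    rw [dif_pos hlt]
    by_cases hle : param ≤ arrLimit[idx]
    · rw [if_pos hle]
      have hidx0 : idx = 0 := by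
        rcases hidx with h0 | hlt'
        · exact h0
        · omega
      subst hidx0
      have hfind : arrLimit.findIdx (fun lm => decide (param ≤ lm)) = 0 :=
        (List.findIdx_eq hlt).mpr ⟨by simpa using hle, fun j hj => by omega⟩
      rw [hfind]
    · rw [if_neg hle]
      by_cases h2 : idx + 1 ≤ arrLimit.length - 1
      · rw [if_pos h2]
        have hlt1 : idx + 1 < arrLimit.length := by omega
        have hget : (PySem.List.pyGet? arrLimit ((idx : Int) + 1)).getD 0 = arrLimit[idx + 1] := by
          have hcast : ((idx : Int) + 1) = (((idx + 1 : Nat)) : Int) := by push_cast; ring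
          rw [hcast, PySem.List.pyGet?_natCast, List.getElem?_eq_getElem hlt1, Option.getD_some]
        rw [hget]
        by_cases h3 : param ≥ arrLimit[idx] ∧ param ≤ arrLimit[idx + 1]
        · rw [if_pos h3]
          have hfind : arrLimit.findIdx (fun lm => decide (param ≤ lm)) = idx + 1 := by
            refine (List.findIdx_eq hlt1).mpr ⟨by simpa using h3.2, fun j hj => ?_⟩
            by_cases hji : j < idx
            · simpa using not_le.mpr (hprev j hji)
            · have : j = idx := by omega
              subst this
              simpa using hle
          rw [hfind]
          simp
        · rw [if_neg h3]
          refine ih (idx + 1) hlt1 ?_ ?_ (by omega)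
          · intro j hj
            by_cases hji : j < idx
            · exact hprev j hji
            · have : j = idx := by omega
              subst this
              exact lt_of_not_ge hle
          · right
            have hge : param ≥ arrLimit[idx] := le_of_lt (lt_of_not_ge hle)
            have : ¬ param ≤ arrLimit[idx + 1] := fun hc => h3 ⟨hge, hc⟩
            exact lt_of_not_ge this
      · rw [if_neg h2]
        have hidxlast : idx = arrLimit.length - 1 := by omega
        have hfind : arrLimit.findIdx (fun lm => decide (param ≤ lm)) = arrLimit.length := by
          refine List.findIdx_eq_length.mpr ?_
          intro x hx
          obtain ⟨j, hj, rfl⟩ := List.mem_iff_getElem.mp hx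
          by_cases hji : j < idx
          · simpa using not_le.mpr (hprev j hji)
          · have : j = idx := by omega
            subst this
            simpa using hle
        rw [hfind, hidxlast]

-- B-side: the divide-and-conquer search returns the leftmost index in [lo,hi)
-- whose limit is ≥ param, or hi when there is none, packaged as three facts.
lemma wcFirstGe_char (param : Int) (arrLimit : List Int) (fuel lo hi : Nat)
    (hlohi : lo < hi) (hhi : hi ≤ arrLimit.length) (hfuel : hi - lo ≤ fuel) :
    (lo ≤ wcFirstGe param arrLimit fuel lo hi ∧ wcFirstGe param arrLimit fuel lo hi ≤ hi) ∧
    (∀ i (_ : lo ≤ i) (_ : i < wcFirstGe param arrLimit fuel lo hi)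
        (h3 : i < arrLimit.length), arrLimit[i]'h3 < param) ∧
    (∀ _ : wcFirstGe param arrLimit fuel lo hi < hi,
        param ≤ arrLimit.getD (wcFirstGe param arrLimit fuel lo hi) 0) := by
  induction fuel generalizing lo hi with
  | zero => omega
  | succ fuel ih =>
    simp only [wcFirstGe]
    rw [if_neg (by omega : ¬ hi ≤ lo)]
    by_cases h1 : hi - lo = 1
    · rw [if_pos h1]
      have hgl : (PySem.List.pyGet? arrLimit (lo : Int)).getD 0
          = arrLimit[lo]'(by omega) := by
        rw [PySem.List.pyGet?_natCast, List.getElem?_eq_getElem (by omega), Option.getD_some]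
      rw [hgl]
      by_cases hp : param ≤ arrLimit[lo]'(by omega)
      · rw [if_pos hp]
        refine ⟨⟨le_refl _, by omega⟩, fun i hi1 hi2 _ => by omega, fun _ => ?_⟩
        rw [List.getD_eq_getElem _ _ (by omega)]
        exact hp
      · rw [if_neg hp]
        refine ⟨⟨by omega, le_refl _⟩, fun i hi1 hi2 hi3 => ?_, fun h => by omega⟩
        have : i = lo := by omega
        subst this
        exact lt_of_not_ge hp
    · rw [if_neg h1]
      have h2 : 2 ≤ hi - lo := by omega
      set mid := (lo + hi) / 2 with hmid
      have hml : lo < mid := by omega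
      have hmh : mid < hi := by omega
      obtain ⟨⟨hL1, hL2⟩, hLfalse, hLtrue⟩ :=
        ih lo mid hml (by omega) (by omega)
      by_cases hk : wcFirstGe param arrLimit fuel lo mid < mid
      · rw [if_pos hk]
        exact ⟨⟨hL1, by omega⟩, hLfalse, fun _ => hLtrue hk⟩
      · rw [if_neg hk]
        have hkeq : wcFirstGe param arrLimit fuel lo mid = mid := by omega
        obtain ⟨⟨hR1, hR2⟩, hRfalse, hRtrue⟩ :=
          ih mid hi hmh hhi (by omega)
        refine ⟨⟨by omega, hR2⟩, fun i hi1 hi2 hi3 => ?_, hRtrue⟩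
        by_cases him : i < mid
        · exact hLfalse i hi1 (by omega) hi3
        · exact hRfalse i (by omega) hi2 hi3

-- the top-level B index equals A's findIdx characterisation
lemma wcFirstGe_eq_findIdx (param : Int) (arrLimit : List Int) (hne : arrLimit ≠ []) :
    wcFirstGe param arrLimit arrLimit.length 0 arrLimit.length
      = arrLimit.findIdx (fun lm => decide (param ≤ lm)) := by
  have hlen : 0 < arrLimit.length := List.length_pos_iff.mpr hne
  obtain ⟨⟨hk1, hk2⟩, hfalse, htrue⟩ :=
    wcFirstGe_char param arrLimit arrLimit.length 0 arrLimit.length hlen (le_refl _) (by omega)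
  set k := wcFirstGe param arrLimit arrLimit.length 0 arrLimit.length with hk
  by_cases hklt : k < arrLimit.length
  · symm
    have htk := htrue hklt
    rw [List.getD_eq_getElem _ _ hklt] at htk
    refine (List.findIdx_eq hklt).mpr ⟨by simpa using htk, fun j hj => ?_⟩
    simpa using not_le.mpr (hfalse j (Nat.zero_le _) hj (by omega))
  · have hkeq : k = arrLimit.length := by omega
    rw [hkeq]
    symm
    refine List.findIdx_eq_length.mpr ?_
    intro x hx
    obtain ⟨j, hj, rfl⟩ := List.mem_iff_getElem.mp hx
    simpa using not_le.mpr (hfalse j (Nat.zero_le _) (by omega) hj)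

-- ===== VERDICT (by name: the statement is the Claim_ definition above) =====
theorem warehousecustom_spec : Claim_equal_warehousecustom := by
  intro param arrLimit arrResult _ _
  unfold Spec_warehousecustom warehousecustom warehousecustom_alt
  by_cases hnil : arrLimit = []
  · subst hnil
    simp [wcLoopA]
  · rw [if_neg hnil]
    have hlen : 0 < arrLimit.length := List.length_pos_iff.mpr hnil
    rw [wcFirstGe_eq_findIdx param arrLimit hnil]
    exact wcLoopA_eq param arrLimit arrResult 0 0 hlen (fun j hj => by omega) (Or.inl rfl)
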